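-- pv_equiv track=rewrite | github.com/FrancyJGLisboa/agri-feeders | scripts/csv_to_json.py | adicionar_coordenadas
-- ===== SOURCE A (Python) =====
-- from typing import Optional, Dict, List, Any
--
-- def adicionar_coordenadas(municipios_data: Dict[str, Dict], coords_lookup: Dict[str, Dict[str, Any]]) -> tuple[int, int]:
--     """Adiciona coordenadas aos dados dos municípios."""
--     matched = 0
--     missing = 0
--
--     for chave, info in municipios_data.items():
--         if chave in coords_lookup:
--             coord = coords_lookup[chave]
--             municipios_data[chave]['lat'] = coord['lat']
--             municipios_data[chave]['lon'] = coord['lon']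
--             if 'cod_ibge' not in info or not info['cod_ibge']:
--                 municipios_data[chave]['cod_ibge'] = coord['cod_ibge']
--             matched += 1
--         else:
--             missing += 1
--
--     return matched, missing
-- ===== SOURCE B (Python) =====
-- def adicionar_coordenadas(municipios_data, coords_lookup):
--     """Adiciona coordenadas aos dados dos municípios."""
--     # sort-merge join: walk the two sorted key lists with two pointers
--     mkeys = sorted(municipios_data)
--     ckeys = sorted(coords_lookup)
--     matched = 0
--     i = 0
--     j = 0
--     while i < len(mkeys) and j < len(ckeys):
--         if mkeys[i] == ckeys[j]:
--             chave = mkeys[i]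
--             info = municipios_data[chave]
--             coord = coords_lookup[chave]
--             info['lat'] = coord['lat']
--             info['lon'] = coord['lon']
--             if 'cod_ibge' not in info or not info['cod_ibge']:
--                 info['cod_ibge'] = coord['cod_ibge']
--             matched += 1
--             i += 1
--             j += 1
--         elif mkeys[i] < ckeys[j]:
--             i += 1
--         else:
--             j += 1
--     return matched, len(municipios_data) - matched
-- ===== Notes on version B (the rewrite author's own statement) =====
-- stated objective: alternative
-- what changed: B replaces A's hash-probe loop (for each municipality, dict membership test and branch counters) by a sort-merge join: both key lists are sorted and walked with two pointers, the in-place updates happen at each key collision, and missing is derived as len(municipios_data) - matched.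
import Mathlib
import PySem

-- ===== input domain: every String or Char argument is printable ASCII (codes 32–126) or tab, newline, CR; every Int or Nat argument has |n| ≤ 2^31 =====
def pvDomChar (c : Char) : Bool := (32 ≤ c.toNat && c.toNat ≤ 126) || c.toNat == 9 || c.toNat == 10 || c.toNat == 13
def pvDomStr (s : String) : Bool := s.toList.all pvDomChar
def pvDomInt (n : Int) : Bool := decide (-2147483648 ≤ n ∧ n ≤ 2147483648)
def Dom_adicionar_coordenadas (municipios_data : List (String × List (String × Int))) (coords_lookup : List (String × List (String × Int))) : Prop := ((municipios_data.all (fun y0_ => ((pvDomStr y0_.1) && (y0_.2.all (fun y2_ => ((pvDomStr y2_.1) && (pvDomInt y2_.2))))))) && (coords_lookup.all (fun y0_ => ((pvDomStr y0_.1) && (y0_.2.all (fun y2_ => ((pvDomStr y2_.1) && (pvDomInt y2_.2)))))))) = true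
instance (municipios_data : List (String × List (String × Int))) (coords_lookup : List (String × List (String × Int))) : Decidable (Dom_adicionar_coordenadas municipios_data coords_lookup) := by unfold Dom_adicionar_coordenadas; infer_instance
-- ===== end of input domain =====

-- B replaces A's hash-probe loop by a sort-merge join over the two sorted key lists (objective:
-- alternative). Both Pythons mutate municipios_data in place to the same final state; the
-- equivalence proved here is about the RETURN value (the two counters) only.

-- ===== PORT A =====
-- dict lookup (first match on the association list)
def pvLookup? (d : List (String × List (String × Int))) (k : String) : Option (List (String × Int)) :=
  (d.find? (fun p => p.1 == k)).map Prod.snd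

-- Literal port of A's loop over municipios_data.items() with the two counters.
-- The loop body's in-place writes (lat/lon/cod_ibge) mutate the argument and never affect the
-- returned counters; Pre_ excludes the inputs where reading coord['lat']/['lon']/['cod_ibge']
-- would raise KeyError, and only the counter state is threaded here.
def adicionar_coordenadas (municipios_data : List (String × List (String × Int))) (coords_lookup : List (String × List (String × Int))) : Int × Int :=
  municipios_data.foldl
    (fun (st : Int × Int) p =>
      match pvLookup? coords_lookup p.1 with
      | some _ => (st.1 + 1, st.2)        -- matched += 1
      | none   => (st.1, st.2 + 1))       -- missing += 1
    (0, 0)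

-- ===== PORT B =====
-- the two-pointer while loop over the sorted key arrays, as structural recursion on the two
-- sorted key lists (the pointers i, j walk suffixes); the body's dict writes at a key collision
-- mutate the argument and never touch the returned counter.
def pvMergeCount : List String → List String → Int
  | [], _ => 0
  | _ :: _, [] => 0
  | a :: as, b :: bs =>
    if a = b then pvMergeCount as bs + 1        -- collision: apply updates, matched += 1, i += 1, j += 1
    else if a < b then pvMergeCount as (b :: bs)  -- i += 1
    else pvMergeCount (a :: as) bs                -- j += 1
termination_by xs ys => xs.length + ys.length

def adicionar_coordenadas_alt (municipios_data : List (String × List (String × Int))) (coords_lookup : List (String × List (String × Int))) : Int × Int :=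
  let mkeys := PySem.List.sorted (municipios_data.map Prod.fst) (fun k => k) false
  let ckeys := PySem.List.sorted (coords_lookup.map Prod.fst) (fun k => k) false
  let matched := pvMergeCount mkeys ckeys
  (matched, (municipios_data.length : Int) - matched)

-- ===== PRECONDITION & SPEC =====
-- does info['cod_ibge'] make A read coord['cod_ibge']? ('cod_ibge' not in info or not info['cod_ibge'])
def pvNeedsIbge (info : List (String × Int)) : Bool :=
  match info.find? (fun q => q.1 == "cod_ibge") with
  | none => true
  | some q => q.2 == 0

-- Pre_ excludes (i) assoc lists whose keys repeat on either side — a Python dict cannot hold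
-- duplicate keys, so such lists represent no input of A — and (ii) inputs where a matched coord
-- dict lacks 'lat' or 'lon', or lacks 'cod_ibge' while the branch needs it: there A (and B alike)
-- raises KeyError.
def Pre_adicionar_coordenadas (municipios_data : List (String × List (String × Int))) (coords_lookup : List (String × List (String × Int))) : Prop :=
  (municipios_data.map Prod.fst).Nodup ∧ (coords_lookup.map Prod.fst).Nodup ∧
  ∀ p ∈ municipios_data, ∀ coord, pvLookup? coords_lookup p.1 = some coord →
    ("lat" ∈ coord.map Prod.fst ∧ "lon" ∈ coord.map Prod.fst ∧
      (pvNeedsIbge p.2 = true → "cod_ibge" ∈ coord.map Prod.fst))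
instance (municipios_data : List (String × List (String × Int))) (coords_lookup : List (String × List (String × Int))) : Decidable (Pre_adicionar_coordenadas municipios_data coords_lookup) := by unfold Pre_adicionar_coordenadas; infer_instance

def pvWitness_adicionar_coordenadas : (List (String × List (String × Int))) × (List (String × List (String × Int))) :=
  ([("sp", [("cod_ibge", 0)]), ("rj", [])],
   [("sp", [("lat", 23), ("lon", 46), ("cod_ibge", 355)])])

def Spec_adicionar_coordenadas (municipios_data : List (String × List (String × Int))) (coords_lookup : List (String × List (String × Int))) (out : Int × Int) : Prop := out = adicionar_coordenadas_alt municipios_data coords_lookup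
instance (municipios_data : List (String × List (String × Int))) (coords_lookup : List (String × List (String × Int))) (out : Int × Int) : Decidable (Spec_adicionar_coordenadas municipios_data coords_lookup out) := by unfold Spec_adicionar_coordenadas; infer_instance

-- ===== CLAIM (what is proved, stated in full; the proofs are below) =====
def Claim_equal_adicionar_coordenadas : Prop := ∀ (municipios_data : List (String × List (String × Int))) (coords_lookup : List (String × List (String × Int))), Dom_adicionar_coordenadas municipios_data coords_lookup → Pre_adicionar_coordenadas municipios_data coords_lookup → Spec_adicionar_coordenadas municipios_data coords_lookup (adicionar_coordenadas municipios_data coords_lookup)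

-- ===== LEMMAS AND PROOFS =====

-- the hit test of A's branch is key membership
lemma pvLookup_isSome (c : List (String × List (String × Int))) (k : String) :
    (pvLookup? c k).isSome = (c.map Prod.fst).contains k := by
  simp only [pvLookup?, Option.isSome_map]
  induction c with
  | nil => rfl
  | cons p rest ih =>
    by_cases h : p.1 = k
    · simp [h]
    · simp [h, Ne.symm h, ih]

-- A's counter loop computes (countP hit, countP miss) from any start
lemma pvFoldA (c : List (String × List (String × Int))) (l : List (String × List (String × Int)))
    (a b : Int) :
    l.foldl (fun (st : Int × Int) p =>
      match pvLookup? c p.1 with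
      | some _ => (st.1 + 1, st.2)
      | none   => (st.1, st.2 + 1)) (a, b)
    = (a + l.countP (fun p => (pvLookup? c p.1).isSome),
       b + l.countP (fun p => !(pvLookup? c p.1).isSome)) := by
  induction l generalizing a b with
  | nil => simp
  | cons p rest ih =>
    rcases h : pvLookup? c p.1 with _ | coord <;> simp [h, ih] <;> ring

-- the two counters partition the list
lemma pvCountSplit {α : Type} (p : α → Bool) (l : List α) :
    l.countP (fun a => !p a) + l.countP p = l.length := by
  induction l with
  | nil => rfl
  | cons x xs ih => cases hx : p x <;> simp [hx] <;> omega

-- the merge walk over a strictly increasing xs and a sorted ys counts xs's keys present in ys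
lemma pvMergeCount_eq (xs ys : List String) (hx : xs.Pairwise (· < ·))
    (hy : ys.Pairwise (· ≤ ·)) :
    pvMergeCount xs ys = (xs.countP (fun k => ys.contains k) : Int) := by
  induction xs, ys using pvMergeCount.induct with
  | case1 ys => simp [pvMergeCount]
  | case2 a as => simp [pvMergeCount]
  | case3 as b bs ih =>
    have has : ∀ x ∈ as, b < x := fun x hx' => (List.pairwise_cons.1 hx).1 x hx'
    have hcong : as.countP (fun k => (b :: bs).contains k) = as.countP (fun k => bs.contains k) :=
      List.countP_congr (fun x hx' => by
        have : x ≠ b := ne_of_gt (has x hx')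
        simp [this])
    have hb : (b :: bs).contains b = true := by simp
    rw [show pvMergeCount (b :: as) (b :: bs) = pvMergeCount as bs + 1 from by
        simp [pvMergeCount],
      ih (List.pairwise_cons.1 hx).2 (List.pairwise_cons.1 hy).2, List.countP_cons, hcong, hb]
    simp
  | case4 a as b bs hne hlt ih =>
    have hbs : ∀ y ∈ bs, b ≤ y := fun y hy' => (List.pairwise_cons.1 hy).1 y hy'
    have hnotmem : (b :: bs).contains a = false := by
      simp only [List.contains_eq_mem, decide_eq_false_iff_not, List.mem_cons, not_or]
      exact ⟨hne, fun hmem => absurd (lt_of_lt_of_le hlt (hbs a hmem)) (lt_irrefl a)⟩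
    simp only [pvMergeCount, if_neg hne, if_pos hlt,
      ih (List.pairwise_cons.1 hx).2 hy, List.countP_cons, hnotmem]
    simp
  | case5 a as b bs hne hnlt ih =>
    have hba : b < a := lt_of_le_of_ne (le_of_not_gt hnlt) (Ne.symm hne)
    have has : ∀ x ∈ as, a < x := fun x hx' => (List.pairwise_cons.1 hx).1 x hx'
    have hcong : (a :: as).countP (fun k => (b :: bs).contains k)
        = (a :: as).countP (fun k => bs.contains k) :=
      List.countP_congr (fun x hx' => by
        have hne' : x ≠ b := by
          rcases List.mem_cons.1 hx' with rfl | hmem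
          · exact ne_of_gt hba
          · exact ne_of_gt (lt_trans hba (has x hmem))
        simp [hne'])
    simp only [pvMergeCount, if_neg hne, if_neg hnlt,
      ih hx (List.pairwise_cons.1 hy).2, hcong]

-- sorting a nodup list gives a strictly increasing list
lemma pvSortedStrict (l : List String) (h : l.Nodup) :
    (PySem.List.sorted l (fun k => k) false).Pairwise (· < ·) := by
  have hperm := PySem.List.sorted_perm l (fun k => k) false
  have hpw : (PySem.List.sorted l (fun k => k) false).Pairwise (· ≤ ·) :=
    PySem.List.sorted_pairwise l (fun k => k)
  have hnd : (PySem.List.sorted l (fun k => k) false).Nodup := hperm.nodup_iff.2 h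
  exact (hpw.and hnd).imp (fun hab => lt_of_le_of_ne hab.1 hab.2)

-- ===== VERDICT (by name: the statement is the Claim_ definition above) =====
theorem adicionar_coordenadas_spec : Claim_equal_adicionar_coordenadas := by
  intro m c _hDom hPre
  unfold Spec_adicionar_coordenadas
  have hcperm := PySem.List.sorted_perm (c.map Prod.fst) (fun k => k) false
  have hmperm := PySem.List.sorted_perm (m.map Prod.fst) (fun k => k) false
  have hcount : (PySem.List.sorted (m.map Prod.fst) (fun k => k) false).countP
      (fun k => (PySem.List.sorted (c.map Prod.fst) (fun k => k) false).contains k)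
      = m.countP (fun p => (pvLookup? c p.1).isSome) := by
    rw [hmperm.countP_eq]
    rw [show (m.map Prod.fst).countP
        (fun k => (PySem.List.sorted (c.map Prod.fst) (fun k => k) false).contains k)
      = (m.map Prod.fst).countP (fun k => (c.map Prod.fst).contains k) from
      List.countP_congr (fun x _ => by
        simp only [List.contains_eq_mem, decide_eq_true_eq]
        exact hcperm.mem_iff)]
    rw [List.countP_map]
    exact List.countP_congr (fun p _ => by simp [Function.comp, pvLookup_isSome])
  have halt : adicionar_coordenadas_alt m c
      = ((m.countP (fun p => (pvLookup? c p.1).isSome) : Int),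
         (m.length : Int) - (m.countP (fun p => (pvLookup? c p.1).isSome) : Int)) := by
    simp only [adicionar_coordenadas_alt]
    rw [pvMergeCount_eq _ _ (pvSortedStrict _ hPre.1)
      (PySem.List.sorted_pairwise (c.map Prod.fst) (fun k => k)), hcount]
  have hsplit := pvCountSplit (fun p => (pvLookup? c p.1).isSome) m
  unfold adicionar_coordenadas
  rw [pvFoldA, halt, Prod.mk.injEq]
  refine ⟨by ring, ?_⟩
  omega
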